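-- pv_equiv track=rewrite | github.com/rameshaj/Hybrid-SDLC-Agents | src/step6_orchestrator_quixbugs_v5_attempts.py | _drop_noop_hunks
-- ===== SOURCE A (Python) =====
-- from typing import Dict, Any, Optional, Tuple, List
--
-- def _drop_noop_hunks(diff: str) -> Tuple[str, bool]:
--     lines = diff.splitlines()
--     fixed: List[str] = []
--     changed = False
--     i = 0
--
--     while i < len(lines):
--         line = lines[i]
--         if not line.startswith("@@ "):
--             fixed.append(line)
--             i += 1
--             continue
--
--         hunk_header = line
--         hunk_body: List[str] = []
--         i += 1
--         while i < len(lines):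
--             l = lines[i]
--             if l.startswith("@@ ") or l.startswith("diff --git"):
--                 break
--             hunk_body.append(l)
--             i += 1
--
--         old_lines: List[str] = []
--         new_lines: List[str] = []
--         for l in hunk_body:
--             if l.startswith("+"):
--                 new_lines.append(l[1:])
--             elif l.startswith("-"):
--                 old_lines.append(l[1:])
--             elif l.startswith("\\"):
--                 continue
--             else:
--                 ctx = l[1:] if l.startswith(" ") else l
--                 old_lines.append(ctx)
--                 new_lines.append(ctx)
--
--         if old_lines == new_lines:
--             changed = True
--             continue
--
--         fixed.append(hunk_header)
--         fixed.extend(hunk_body)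
--
--     return "\n".join(fixed).strip() + "\n", changed
-- ===== SOURCE B (Python) =====
-- from typing import Tuple, List
--
-- def _drop_noop_hunks(diff: str) -> Tuple[str, bool]:
--     # Pass 1: parse the diff into segments (raw lines / hunks with header+body).
--     segments: List[tuple] = []
--     cur = None  # the body list of the currently open hunk, if any
--     for line in diff.splitlines():
--         if line.startswith("@@ "):
--             cur = []
--             segments.append(("hunk", line, cur))
--         elif cur is not None and not line.startswith("diff --git"):
--             cur.append(line)
--         else:
--             cur = None
--             segments.append(("raw", line))
--
--     # Pass 2: emit segments, dropping hunks whose old and new sides coincide.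
--     out: List[str] = []
--     changed = False
--     for seg in segments:
--         if seg[0] == "raw":
--             out.append(seg[1])
--         else:
--             _, header, body = seg
--             keep = [l for l in body if not l.startswith("\\")]
--             old = [l[1:] if l.startswith((" ", "-")) else l
--                    for l in keep if not l.startswith("+")]
--             new = [l[1:] if l.startswith((" ", "+")) else l
--                    for l in keep if not l.startswith("-")]
--             if old == new:
--                 changed = True
--             else:
--                 out.append(header)
--                 out.extend(body)
--     return "\n".join(out).strip() + "\n", changed
-- ===== Notes on version B (the rewrite author's own statement) =====
-- stated objective: alternative
-- what changed: Replaces A's index-driven while-loop state machine with a parse-then-filter decomposition: one pass groups the lines into raw/hunk segments, a second pass reconstructs old/new sides via filter+map comprehensions and drops no-op hunks.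
import Mathlib
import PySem

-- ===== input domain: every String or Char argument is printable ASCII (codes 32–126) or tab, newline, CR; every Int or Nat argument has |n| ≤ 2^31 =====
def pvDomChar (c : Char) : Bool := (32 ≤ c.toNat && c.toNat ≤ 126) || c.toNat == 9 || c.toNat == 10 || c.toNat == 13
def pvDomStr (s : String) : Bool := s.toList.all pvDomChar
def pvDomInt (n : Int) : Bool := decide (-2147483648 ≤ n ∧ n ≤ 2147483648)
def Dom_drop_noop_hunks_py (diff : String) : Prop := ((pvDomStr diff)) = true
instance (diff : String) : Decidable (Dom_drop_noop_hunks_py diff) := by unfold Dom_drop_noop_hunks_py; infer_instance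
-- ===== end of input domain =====

-- B replaces A's index-driven while-loop state machine by a parse-then-filter decomposition
-- (one pass builds raw/hunk segments, a second pass drops the no-op hunks); alternative, same cost.

-- ===== PORT A =====
def pvHdr (l : String) : Bool := PySem.Str.startswith l "@@ "
def pvStopA (l : String) : Bool :=
  PySem.Str.startswith l "@@ " || PySem.Str.startswith l "diff --git"

-- the body of A's `for l in hunk_body` loop, building (old_lines, new_lines)
def pvOldNewA (on : List String × List String) (l : String) : List String × List String :=
  if PySem.Str.startswith l "+" then (on.1, on.2 ++ [PySem.Str.slice l (some 1) none])
  else if PySem.Str.startswith l "-" then (on.1 ++ [PySem.Str.slice l (some 1) none], on.2)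
  else if PySem.Str.startswith l "\\" then on
  else
    let ctx := if PySem.Str.startswith l " " then PySem.Str.slice l (some 1) none else l
    (on.1 ++ [ctx], on.2 ++ [ctx])

-- A's outer `while i < len(lines)` loop; the inner body-collecting while is takeWhile/dropWhile
def pvGoA : List String → List String → Bool → List String × Bool
  | [], fixed, changed => (fixed, changed)
  | line :: rest, fixed, changed =>
    if ¬ pvHdr line then pvGoA rest (fixed ++ [line]) changed
    else
      let body := rest.takeWhile (fun x => !pvStopA x)
      let rest' := rest.dropWhile (fun x => !pvStopA x)
      let on := body.foldl pvOldNewA ([], [])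
      if on.1 = on.2 then pvGoA rest' fixed true
      else pvGoA rest' (fixed ++ [line] ++ body) changed
termination_by lines _ _ => lines.length
decreasing_by
  · simp
  · have := List.length_dropWhile_le (fun x => !pvStopA x) rest; simp; omega
  · have := List.length_dropWhile_le (fun x => !pvStopA x) rest; simp; omega

def drop_noop_hunks_py (diff : String) : String × Bool :=
  let r := pvGoA (PySem.Str.splitlines diff) [] false
  (PySem.Str.strip (PySem.Str.join "\n" r.1) ++ "\n", r.2)

-- ===== PORT B =====
inductive PvSeg where
  | raw : String → PvSeg
  | hunk : String → List String → PvSeg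
deriving DecidableEq, Repr

-- in Source B the open hunk's body list is already inside `segments` (shared mutation);
-- here the open hunk is carried separately and flushed into the segment list
def pvFlush (segs : List PvSeg) : Option (String × List String) → List PvSeg
  | none => segs
  | some (h, b) => segs ++ [PvSeg.hunk h b]

-- one step of B's first pass (`for line in diff.splitlines()`)
def pvStepB (st : List PvSeg × Option (String × List String)) (line : String) :
    List PvSeg × Option (String × List String) :=
  if PySem.Str.startswith line "@@ " then
    (pvFlush st.1 st.2, some (line, ([] : List String)))
  else
    match st.2 with
    | some (h, b) =>
      if PySem.Str.startswith line "diff --git" then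
        (pvFlush st.1 (some (h, b)) ++ [PvSeg.raw line], none)
      else (st.1, some (h, b ++ [line]))
    | none => (st.1 ++ [PvSeg.raw line], none)

def pvParseB (lines : List String) : List PvSeg :=
  let st := lines.foldl pvStepB ([], none)
  pvFlush st.1 st.2

-- B's comprehensions: keep = non-'\' lines; old/new as filter-then-map
def pvOldB (body : List String) : List String :=
  (((body.filter (fun l => ¬ PySem.Str.startswith l "\\")).filter
      (fun l => ¬ PySem.Str.startswith l "+")).map
    (fun l => if PySem.Str.startswith l " " || PySem.Str.startswith l "-" then
                PySem.Str.slice l (some 1) none else l))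

def pvNewB (body : List String) : List String :=
  (((body.filter (fun l => ¬ PySem.Str.startswith l "\\")).filter
      (fun l => ¬ PySem.Str.startswith l "-")).map
    (fun l => if PySem.Str.startswith l " " || PySem.Str.startswith l "+" then
                PySem.Str.slice l (some 1) none else l))

-- one step of B's second pass (`for seg in segments`)
def pvEmitB (st : List String × Bool) (seg : PvSeg) : List String × Bool :=
  match seg with
  | PvSeg.raw l => (st.1 ++ [l], st.2)
  | PvSeg.hunk h b =>
    if pvOldB b = pvNewB b then (st.1, true) else (st.1 ++ [h] ++ b, st.2)

def drop_noop_hunks_py_alt (diff : String) : String × Bool :=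
  let r := (pvParseB (PySem.Str.splitlines diff)).foldl pvEmitB ([], false)
  (PySem.Str.strip (PySem.Str.join "\n" r.1) ++ "\n", r.2)

-- ===== PRECONDITION & SPEC =====
def Spec_drop_noop_hunks_py (diff : String) (out : String × Bool) : Prop := out = drop_noop_hunks_py_alt diff
instance (diff : String) (out : String × Bool) : Decidable (Spec_drop_noop_hunks_py diff out) := by unfold Spec_drop_noop_hunks_py; infer_instance

-- ===== CLAIM (what is proved, stated in full; the proofs are below) =====
def Claim_equal_drop_noop_hunks_py : Prop := ∀ (diff : String), Dom_drop_noop_hunks_py diff → Spec_drop_noop_hunks_py diff (drop_noop_hunks_py diff)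

-- ===== LEMMAS AND PROOFS =====

-- proof-side recursive segmentation, mirroring A's hunk grouping
def pvParseRec : List String → List PvSeg
  | [] => []
  | l :: ls =>
    if pvHdr l then
      PvSeg.hunk l (ls.takeWhile (fun x => !pvStopA x)) ::
        pvParseRec (ls.dropWhile fun x => !pvStopA x)
    else PvSeg.raw l :: pvParseRec ls
termination_by lines => lines.length
decreasing_by
  · have := List.length_dropWhile_le (fun x => !pvStopA x) ls; simp; omega
  · simp

theorem chars_sw_excl {cs : List Char} {c d : Char} (hcd : c ≠ d)
    (h : PySem.Chars.startswith cs [c] = true) : PySem.Chars.startswith cs [d] = false := by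
  cases cs with
  | nil => simp [PySem.Chars.startswith, List.isPrefixOf] at h
  | cons a t =>
    simp [PySem.Chars.startswith, List.isPrefixOf] at h ⊢
    intro hh; exact hcd (by rw [h, hh])

theorem step_eq (o n : List String) (l : String) :
    pvOldNewA (o, n) l = (o ++ pvOldB [l], n ++ pvNewB [l]) := by
  unfold pvOldNewA pvOldB pvNewB
  by_cases h1 : PySem.Str.startswith l "+" = true
  · have h2 := chars_sw_excl (cs := l.toList) (c := '+') (d := '-') (by decide) (by simpa [PySem.Str.startswith] using h1)
    have h3 := chars_sw_excl (cs := l.toList) (c := '+') (d := '\\') (by decide) (by simpa [PySem.Str.startswith] using h1)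
    have h4 := chars_sw_excl (cs := l.toList) (c := '+') (d := ' ') (by decide) (by simpa [PySem.Str.startswith] using h1)
    simp [PySem.Str.startswith] at *
    simp [h1, h2, h3, h4]
  · by_cases h2 : PySem.Str.startswith l "-" = true
    · have h3 := chars_sw_excl (cs := l.toList) (c := '-') (d := '\\') (by decide) (by simpa [PySem.Str.startswith] using h2)
      have h4 := chars_sw_excl (cs := l.toList) (c := '-') (d := ' ') (by decide) (by simpa [PySem.Str.startswith] using h2)
      simp [PySem.Str.startswith] at *
      simp [h1, h2, h3, h4]
    · by_cases h3 : PySem.Str.startswith l "\\" = true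
      · simp [PySem.Str.startswith] at *
        simp [h1, h2, h3]
      · simp [PySem.Str.startswith] at *
        simp [h1, h2, h3]

theorem oldB_append (a b : List String) : pvOldB (a ++ b) = pvOldB a ++ pvOldB b := by
  simp [pvOldB]

theorem newB_append (a b : List String) : pvNewB (a ++ b) = pvNewB a ++ pvNewB b := by
  simp [pvNewB]

theorem pvOldNewA_eq (body : List String) :
    ∀ o n, body.foldl pvOldNewA (o, n) = (o ++ pvOldB body, n ++ pvNewB body) := by
  induction body with
  | nil => intro o n; simp [pvOldB, pvNewB]
  | cons l body ih =>
    intro o n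
    rw [show (l :: body) = [l] ++ body from rfl, List.foldl_append, oldB_append, newB_append]
    simp only [List.foldl, step_eq, ih]
    simp [List.append_assoc]

theorem pvFlush_none (segs : List PvSeg) : pvFlush segs none = segs := rfl

theorem pvFlush_some (segs : List PvSeg) (h : String) (b : List String) :
    pvFlush segs (some (h, b)) = segs ++ [PvSeg.hunk h b] := rfl

theorem pvParseB_eq : ∀ (lines : List String),
    (∀ segs, pvFlush (lines.foldl pvStepB (segs, none)).1 (lines.foldl pvStepB (segs, none)).2
        = segs ++ pvParseRec lines)
    ∧ (∀ segs h b,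
        pvFlush (lines.foldl pvStepB (segs, some (h, b))).1 (lines.foldl pvStepB (segs, some (h, b))).2
          = segs ++ [PvSeg.hunk h (b ++ lines.takeWhile (fun x => !pvStopA x))]
              ++ pvParseRec (lines.dropWhile fun x => !pvStopA x))
  | [] => by
    constructor
    · intro segs; simp [pvFlush, pvParseRec]
    · intro segs h b; simp [pvFlush, pvParseRec]
  | l :: ls => by
    have IH := pvParseB_eq ls
    constructor
    · intro segs
      by_cases hh : PySem.Str.startswith l "@@ " = true
      · simp only [List.foldl, pvStepB, hh, if_pos, pvFlush_none]
        rw [IH.2 segs l []]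
        rw [pvParseRec]
        simp only [PySem.Str.startswith, show ("@@ ".toList)=['@','@',' '] from rfl] at hh
        simp [pvHdr, hh]
      · simp only [List.foldl, pvStepB, hh, if_neg, Bool.false_eq_true, not_false_iff, pvFlush_none]
        rw [IH.1 (segs ++ [PvSeg.raw l])]
        rw [pvParseRec]
        simp only [PySem.Str.startswith, show ("@@ ".toList)=['@','@',' '] from rfl] at hh
        simp [pvHdr, hh]
    · intro segs h b
      by_cases hh : PySem.Str.startswith l "@@ " = true
      · have hstop : pvStopA l = true := by unfold pvStopA; rw [hh]; simp
        have htw : List.takeWhile (fun x => !pvStopA x) (l :: ls) = [] := by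
          rw [List.takeWhile_cons, hstop]; simp
        have hdw : List.dropWhile (fun x => !pvStopA x) (l :: ls) = l :: ls := by
          rw [List.dropWhile_cons, hstop]; simp
        simp only [List.foldl, pvStepB, hh, if_pos, pvFlush_some]
        rw [IH.2 (segs ++ [PvSeg.hunk h b]) l [], htw, hdw, pvParseRec]
        simp only [PySem.Str.startswith, show ("@@ ".toList)=['@','@',' '] from rfl] at hh
        simp [pvHdr, hh]
      · by_cases hd : PySem.Str.startswith l "diff --git" = true
        · have hstop : pvStopA l = true := by unfold pvStopA; rw [hd]; simp
          have htw : List.takeWhile (fun x => !pvStopA x) (l :: ls) = [] := by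
            rw [List.takeWhile_cons, hstop]; simp
          have hdw : List.dropWhile (fun x => !pvStopA x) (l :: ls) = l :: ls := by
            rw [List.dropWhile_cons, hstop]; simp
          simp only [List.foldl, pvStepB, hh, hd, if_neg, if_pos, Bool.false_eq_true,
            not_false_iff, pvFlush_some]
          rw [IH.1 (segs ++ [PvSeg.hunk h b] ++ [PvSeg.raw l]), htw, hdw, pvParseRec]
          simp only [PySem.Str.startswith, show ("@@ ".toList)=['@','@',' '] from rfl] at hh
          simp [pvHdr, hh]
        · have hstop : pvStopA l = false := by
            unfold pvStopA; simp only [Bool.or_eq_false_iff]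
            exact ⟨by simpa using hh, by simpa using hd⟩
          have htw : List.takeWhile (fun x => !pvStopA x) (l :: ls)
              = l :: List.takeWhile (fun x => !pvStopA x) ls := by
            rw [List.takeWhile_cons, hstop]; simp
          have hdw : List.dropWhile (fun x => !pvStopA x) (l :: ls)
              = List.dropWhile (fun x => !pvStopA x) ls := by
            rw [List.dropWhile_cons, hstop]; simp
          simp only [List.foldl, pvStepB, hh, hd, if_neg, Bool.false_eq_true, not_false_iff]
          rw [IH.2 segs h (b ++ [l]), htw, hdw]
          simp [List.append_assoc]

theorem pvGoA_eq_aux : ∀ (n : Nat) (lines : List String), lines.length ≤ n →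
    ∀ fixed changed, pvGoA lines fixed changed = (pvParseRec lines).foldl pvEmitB (fixed, changed) := by
  intro n
  induction n with
  | zero =>
    intro lines hlen fixed changed
    have : lines = [] := List.eq_nil_of_length_eq_zero (Nat.le_zero.1 hlen)
    subst this
    simp [pvGoA, pvParseRec]
  | succ n ih =>
    intro lines hlen fixed changed
    cases lines with
    | nil => simp [pvGoA, pvParseRec]
    | cons l ls =>
      by_cases hh : pvHdr l
      · rw [pvGoA, pvParseRec]
        simp only [hh, if_pos, not_true, if_neg, not_false_iff]
        rw [pvOldNewA_eq]
        simp only [List.nil_append, List.foldl_cons, pvEmitB]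
        have hlen' : (ls.dropWhile fun x => !pvStopA x).length ≤ n := by
          have := List.length_dropWhile_le (fun x => !pvStopA x) ls
          simp at hlen; omega
        by_cases he : pvOldB (ls.takeWhile fun x => !pvStopA x) = pvNewB (ls.takeWhile fun x => !pvStopA x)
        · simp only [he, if_pos]
          rw [ih _ hlen']
        · simp only [he, if_false]
          rw [ih _ hlen']
      · rw [pvGoA, pvParseRec]
        simp only [hh, if_neg, Bool.false_eq_true, not_false_iff, if_pos]
        simp only [List.foldl_cons, pvEmitB]
        have hlen' : ls.length ≤ n := by simp at hlen; omega
        rw [ih _ hlen']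

theorem pvGoA_eq (lines : List String) :
    ∀ fixed changed, pvGoA lines fixed changed = (pvParseRec lines).foldl pvEmitB (fixed, changed) :=
  pvGoA_eq_aux lines.length lines (Nat.le_refl _)

-- ===== VERDICT (by name: the statement is the Claim_ definition above) =====
theorem drop_noop_hunks_py_spec : Claim_equal_drop_noop_hunks_py := by
  intro diff _
  unfold Spec_drop_noop_hunks_py drop_noop_hunks_py drop_noop_hunks_py_alt pvParseB
  rw [(pvParseB_eq (PySem.Str.splitlines diff)).1 [], pvGoA_eq]
  simp
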